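-- pv_equiv track=rewrite | github.com/Trinitui/Advent-of-Code | 2022/Day 3/day3-2.py | entryScoring
-- ===== SOURCE A (Python) =====
-- from string import ascii_lowercase, ascii_uppercase
--
-- def entryScoring(entry):
--     score = 0
--     for i,lowercase_el in enumerate(ascii_lowercase):
--         if lowercase_el == entry:
--             score += i+1
--     for j,uppercase_el in enumerate(ascii_uppercase):
--         if uppercase_el == entry:
--             score += j+27
--     return score
-- ===== SOURCE B (Python) =====
-- def entryScoring(entry):
--     # Closed-form scoring via ord arithmetic; 0 for anything but a single letter.
--     if not isinstance(entry, str) or len(entry) != 1: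
--         return 0
--     if 'a' <= entry <= 'z':
--         return ord(entry) - ord('a') + 1
--     if 'A' <= entry <= 'Z':
--         return ord(entry) - ord('A') + 27
--     return 0
-- ===== Notes on version B (the rewrite author's own statement) =====
-- stated objective: simpler
-- what changed: Replaces the two enumerate scans over the alphabet constants with a length guard and a closed-form ord() computation of the letter's rank.
import Mathlib
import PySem

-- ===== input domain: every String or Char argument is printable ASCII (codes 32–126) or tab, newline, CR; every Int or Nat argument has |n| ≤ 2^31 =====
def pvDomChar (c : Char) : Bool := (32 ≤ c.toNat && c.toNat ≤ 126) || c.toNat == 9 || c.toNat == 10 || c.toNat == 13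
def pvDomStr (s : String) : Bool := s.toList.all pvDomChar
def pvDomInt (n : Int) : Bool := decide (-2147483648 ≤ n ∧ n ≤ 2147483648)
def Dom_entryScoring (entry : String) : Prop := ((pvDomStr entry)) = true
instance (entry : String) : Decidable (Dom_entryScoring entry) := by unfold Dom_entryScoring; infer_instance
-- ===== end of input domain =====

-- B replaces A's two enumerate scans over the alphabet constants with a length guard and a
-- closed-form ord computation (simpler; same results for every string).

-- ===== PORT A =====
-- string.ascii_lowercase / string.ascii_uppercase
def pyAsciiLowercase : List Char := "abcdefghijklmnopqrstuvwxyz".toList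
def pyAsciiUppercase : List Char := "ABCDEFGHIJKLMNOPQRSTUVWXYZ".toList

-- A's body over the char list of `entry`; `enumerate` is `zipIdx` ((element, index) pairs);
-- the Python string equality `lowercase_el == entry` is the char-list equality `l == [p.1]` (exact).
def entryScoringChars (l : List Char) : Int :=
  let score : Int := 0
  let score := pyAsciiLowercase.zipIdx.foldl
    (fun score p => if l == [p.1] then score + ((p.2 : Int) + 1) else score) score
  let score := pyAsciiUppercase.zipIdx.foldl
    (fun score p => if l == [p.1] then score + ((p.2 : Int) + 27) else score) score
  score

def entryScoring (entry : String) : Int := entryScoringChars entry.toList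

-- ===== PORT B =====
-- Source B's guard `len(entry) == 1` is the singleton match; `'a' <= entry <= 'z'` on one-char
-- strings is exactly the code-point comparison, and ord(c) is c.toNat (exact).
def entryScoringAltChars (l : List Char) : Int :=
  match l with
  | [c] =>
    if 97 ≤ c.toNat ∧ c.toNat ≤ 122 then (c.toNat : Int) - 97 + 1
    else if 65 ≤ c.toNat ∧ c.toNat ≤ 90 then (c.toNat : Int) - 65 + 27
    else 0
  | _ => 0

def entryScoring_alt (entry : String) : Int := entryScoringAltChars entry.toList

-- ===== PRECONDITION & SPEC =====
def Spec_entryScoring (entry : String) (out : Int) : Prop := out = entryScoring_alt entry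
instance (entry : String) (out : Int) : Decidable (Spec_entryScoring entry out) := by unfold Spec_entryScoring; infer_instance

-- ===== CLAIM (what is proved, stated in full; the proofs are below) =====
def Claim_equal_entryScoring : Prop := ∀ (entry : String), Dom_entryScoring entry → Spec_entryScoring entry (entryScoring entry)

-- ===== LEMMAS AND PROOFS =====

-- A's fold adds nothing when `entry` is not a single character: every condition is false.
theorem nil_eq : entryScoringChars [] = entryScoringAltChars [] := by
  simp [entryScoringChars, entryScoringAltChars]

theorem long_eq (a b : Char) (rest : List Char) :
    entryScoringChars (a :: b :: rest) = entryScoringAltChars (a :: b :: rest) := by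
  simp [entryScoringChars, entryScoringAltChars]

-- every single character of the ASCII/control domain (code < 127), checked by evaluation
set_option maxRecDepth 16384 in
theorem single_eq (n : Nat) (hn : n < 127) :
    entryScoringChars [Char.ofNat n] = entryScoringAltChars [Char.ofNat n] := by
  revert n hn
  decide

-- ===== VERDICT (by name: the statement is the Claim_ definition above) =====
theorem entryScoring_spec : Claim_equal_entryScoring := by
  intro entry hdom
  unfold Spec_entryScoring entryScoring entryScoring_alt
  rcases hl : entry.toList with _ | ⟨c, rest⟩
  · exact nil_eq
  · rcases rest with _ | ⟨d, rest'⟩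
    · have hc : pvDomChar c = true := by
        have := hdom
        unfold Dom_entryScoring pvDomStr at this
        rw [hl] at this
        simpa using this
      have hlt : c.toNat < 127 := by
        unfold pvDomChar at hc
        simp at hc
        omega
      have := single_eq c.toNat hlt
      rwa [Char.ofNat_toNat] at this
    · exact long_eq c d rest'
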